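-- pv_equiv track=rewrite | github.com/avyuktgiri/ami-clinical-records-system | seed_db.py | build_weighted_doctor_cycles
-- ===== SOURCE A (Python) =====
-- def build_weighted_doctor_cycles(doctors_by_hospital):
--     weighted_cycles = {}
--     for hospital_id, doctor_ids in doctors_by_hospital.items():
--         if len(doctor_ids) == 5:
--             weighted_cycles[hospital_id] = {
--                 1: [
--                     doctor_ids[0], doctor_ids[0], doctor_ids[0],
--                     doctor_ids[1], doctor_ids[1],
--                     doctor_ids[2],
--                 ],
--                 0: [
--                     doctor_ids[3], doctor_ids[3], doctor_ids[3],
--                     doctor_ids[4], doctor_ids[4],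
--                     doctor_ids[2],
--                 ],
--             }
--         elif len(doctor_ids) == 4:
--             weighted_cycles[hospital_id] = {
--                 1: [
--                     doctor_ids[0], doctor_ids[0], doctor_ids[0],
--                     doctor_ids[1], doctor_ids[1],
--                     doctor_ids[2],
--                 ],
--                 0: [
--                     doctor_ids[3], doctor_ids[3], doctor_ids[3],
--                     doctor_ids[2], doctor_ids[2],
--                     doctor_ids[1],
--                 ],
--             }
--         else:
--             weighted_cycles[hospital_id] = {
--                 1: [
--                     doctor_ids[0], doctor_ids[0], doctor_ids[0],
--                     doctor_ids[1], doctor_ids[1],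
--                     doctor_ids[2], doctor_ids[2],
--                     doctor_ids[3],
--                 ],
--                 0: [
--                     doctor_ids[4], doctor_ids[4], doctor_ids[4],
--                     doctor_ids[5], doctor_ids[5],
--                     doctor_ids[3], doctor_ids[3],
--                     doctor_ids[2],
--                 ],
--             }
--     return weighted_cycles
-- ===== SOURCE B (Python) =====
-- def build_weighted_doctor_cycles(doctors_by_hospital):
--     # Parameterised closed form: the three branch patterns are instances of one
--     # rule driven by two small numbers (front size m, backup count b); the index
--     # sequences and weights are computed, not tabulated.
--     out = {}
--     for hospital_id, doctor_ids in doctors_by_hospital.items():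
--         n = len(doctor_ids)
--         m = 3 if n in (4, 5) else 4          # size of the primary ("1") roster
--         b = min(n - m, 2)                    # dedicated backups for the "0" roster
--         weights = [3] + [2] * (m - 2) + [1]
--         ones = list(range(m))
--         zeros = list(range(m, m + b)) + list(range(m - 1, b - 1, -1))
--         out[hospital_id] = {
--             key: [doctor_ids[i] for i, w in zip(sel, weights) for _ in range(w)]
--             for key, sel in ((1, ones), (0, zeros))
--         }
--     return out
-- ===== Notes on version B (the rewrite author's own statement) =====
-- stated objective: alternative
-- what changed: Replaces A's three hard-coded branches of literal repeated-element lists by one parameterised rule: a front size m and backup count b derived from the length generate both index ranges (front ascending, backups then shared pivots descending) and the weight list, so a single generic construction covers all length cases.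
import Mathlib
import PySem

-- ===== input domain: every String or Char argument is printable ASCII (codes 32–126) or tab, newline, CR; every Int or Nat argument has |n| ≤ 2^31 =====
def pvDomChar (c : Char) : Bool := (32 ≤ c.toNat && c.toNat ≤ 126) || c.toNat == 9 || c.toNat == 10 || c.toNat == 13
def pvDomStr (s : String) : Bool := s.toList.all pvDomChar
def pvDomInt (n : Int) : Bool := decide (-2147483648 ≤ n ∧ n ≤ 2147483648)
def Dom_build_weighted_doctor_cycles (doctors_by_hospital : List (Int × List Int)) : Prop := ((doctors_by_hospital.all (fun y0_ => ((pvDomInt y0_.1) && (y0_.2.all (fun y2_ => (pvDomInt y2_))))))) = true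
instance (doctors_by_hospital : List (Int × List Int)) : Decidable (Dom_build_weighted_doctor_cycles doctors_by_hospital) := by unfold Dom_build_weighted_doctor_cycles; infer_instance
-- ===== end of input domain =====

-- B replaces A's three hard-coded literal branches by one parameterised rule: a front size m
-- and backup count b computed from the length generate the index ranges and weight list that
-- produce both rosters; proved equal to A on lists of length 4, 5 or ≥ 6 (A raises otherwise).


-- doctor_ids[i] for a non-negative in-range index; the default 0 is never reached under
-- Pre_ (Python raises IndexError exactly where pyGet? is none, and those inputs are excluded).
def pvIdx (d : List Int) (i : Int) : Int := (PySem.List.pyGet? d i).getD 0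

-- ===== PORT A =====
-- loop body of A: one branch per length, literal value lists, dict insert (overwrite in place)
def pvStepA (wc : PySem.Dict Int (List (Int × List Int))) (p : Int × List Int) :
    PySem.Dict Int (List (Int × List Int)) :=
  let hid := p.1
  let d := p.2
  if d.length == 5 then
    wc.insert hid
      [(1, [pvIdx d 0, pvIdx d 0, pvIdx d 0, pvIdx d 1, pvIdx d 1, pvIdx d 2]),
       (0, [pvIdx d 3, pvIdx d 3, pvIdx d 3, pvIdx d 4, pvIdx d 4, pvIdx d 2])]
  else if d.length == 4 then
    wc.insert hid
      [(1, [pvIdx d 0, pvIdx d 0, pvIdx d 0, pvIdx d 1, pvIdx d 1, pvIdx d 2]),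
       (0, [pvIdx d 3, pvIdx d 3, pvIdx d 3, pvIdx d 2, pvIdx d 2, pvIdx d 1])]
  else
    wc.insert hid
      [(1, [pvIdx d 0, pvIdx d 0, pvIdx d 0, pvIdx d 1, pvIdx d 1, pvIdx d 2, pvIdx d 2, pvIdx d 3]),
       (0, [pvIdx d 4, pvIdx d 4, pvIdx d 4, pvIdx d 5, pvIdx d 5, pvIdx d 3, pvIdx d 3, pvIdx d 2])]

def build_weighted_doctor_cycles (doctors_by_hospital : List (Int × List Int)) : List (Int × List (Int × List Int)) :=
  (doctors_by_hospital.foldl pvStepA PySem.Dict.empty).items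

-- ===== PORT B =====
-- [doctor_ids[i] for i, w in zip(sel, weights) for _ in range(w)]
def pvExpand (d : List Int) (sel : List Int) (weights : List Int) : List Int :=
  (sel.zip weights).flatMap (fun iw => List.replicate iw.2.toNat (pvIdx d iw.1))

-- loop body of B: derive (m, b), then compute weights and both index sequences from them
def pvStepB (wc : PySem.Dict Int (List (Int × List Int))) (p : Int × List Int) :
    PySem.Dict Int (List (Int × List Int)) :=
  let hid := p.1
  let d := p.2
  let n : Int := d.length
  let m : Int := if n == 4 || n == 5 then 3 else 4
  let b : Int := min (n - m) 2
  let weights : List Int := [3] ++ List.replicate (m - 2).toNat 2 ++ [1]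
  let ones := PySem.List.pyRange 0 m 1
  let zeros := PySem.List.pyRange m (m + b) 1 ++ PySem.List.pyRange (m - 1) (b - 1) (-1)
  wc.insert hid [(1, pvExpand d ones weights), (0, pvExpand d zeros weights)]

def build_weighted_doctor_cycles_alt (doctors_by_hospital : List (Int × List Int)) : List (Int × List (Int × List Int)) :=
  (doctors_by_hospital.foldl pvStepB PySem.Dict.empty).items

-- ===== PRECONDITION & SPEC =====
-- Pre_ excludes exactly the inputs where the Python A raises IndexError (a doctor list of
-- length ≤ 3: the default branch reads indices up to 5); B raises there too.
def Pre_build_weighted_doctor_cycles (doctors_by_hospital : List (Int × List Int)) : Prop :=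
  ∀ p ∈ doctors_by_hospital, p.2.length = 4 ∨ p.2.length = 5 ∨ 6 ≤ p.2.length
instance (doctors_by_hospital : List (Int × List Int)) : Decidable (Pre_build_weighted_doctor_cycles doctors_by_hospital) := by unfold Pre_build_weighted_doctor_cycles; infer_instance

def pvWitness_build_weighted_doctor_cycles : (List (Int × List Int)) :=
  [(1, [10, 20, 30, 40, 50]), (2, [1, 2, 3, 4]), (3, [1, 2, 3, 4, 5, 6, 7])]

def Spec_build_weighted_doctor_cycles (doctors_by_hospital : List (Int × List Int)) (out : List (Int × List (Int × List Int))) : Prop := out = build_weighted_doctor_cycles_alt doctors_by_hospital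
instance (doctors_by_hospital : List (Int × List Int)) (out : List (Int × List (Int × List Int))) : Decidable (Spec_build_weighted_doctor_cycles doctors_by_hospital out) := by unfold Spec_build_weighted_doctor_cycles; infer_instance

-- ===== CLAIM (what is proved, stated in full; the proofs are below) =====
def Claim_equal_build_weighted_doctor_cycles : Prop := ∀ (doctors_by_hospital : List (Int × List Int)), Dom_build_weighted_doctor_cycles doctors_by_hospital → Pre_build_weighted_doctor_cycles doctors_by_hospital → Spec_build_weighted_doctor_cycles doctors_by_hospital (build_weighted_doctor_cycles doctors_by_hospital)

-- ===== LEMMAS AND PROOFS =====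
-- On an entry of admissible length the two loop bodies agree: B's derived (m, b) pattern
-- expands to exactly A's literal lists in each of the three length cases.
theorem pvStep_eq (wc : PySem.Dict Int (List (Int × List Int))) (hid : Int) (d : List Int)
    (h : d.length = 4 ∨ d.length = 5 ∨ 6 ≤ d.length) :
    pvStepA wc (hid, d) = pvStepB wc (hid, d) := by
  rcases d with _ | ⟨a, _ | ⟨b, _ | ⟨c, _ | ⟨e, _ | ⟨f, _ | ⟨g, rest⟩⟩⟩⟩⟩⟩ <;>
    simp only [List.length] at h <;> try omega
  · -- length 4: m = 3, b = 1, zeros = [3] ++ [2, 1]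
    unfold pvStepA pvStepB; norm_num; rfl
  · -- length 5: m = 3, b = 2, zeros = [3, 4] ++ [2]
    unfold pvStepA pvStepB; norm_num; rfl
  · -- length ≥ 6: m = 4, b = 2, zeros = [4, 5] ++ [3, 2]
    have hcond : ¬((rest.length : Int) + 1 + 1 + 1 + 1 + 1 + 1 = 4 ∨
        (rest.length : Int) + 1 + 1 + 1 + 1 + 1 + 1 = 5) := by omega
    have hA5 : ¬(rest.length + 1 + 1 + 1 + 1 + 1 + 1 = 5) := by omega
    have hA4 : ¬(rest.length + 1 + 1 + 1 + 1 + 1 + 1 = 4) := by omega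
    have hmin : min ((rest.length : Int) + 1 + 1 + 1 + 1 + 1 + 1 - 4) 2 = 2 := by omega
    unfold pvStepA pvStepB
    norm_num [hA5, hA4, hcond, hmin]
    rfl

theorem build_weighted_doctor_cycles_spec : Claim_equal_build_weighted_doctor_cycles := by
  intro dbh _ hpre
  unfold Spec_build_weighted_doctor_cycles build_weighted_doctor_cycles build_weighted_doctor_cycles_alt
  refine congrArg PySem.Dict.items ?_
  apply PySem.List.foldl_congr_mem
  intro acc p hp
  exact pvStep_eq acc p.1 p.2 (hpre p hp)
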